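-- pv_equiv track=rewrite | github.com/adityakrmishra/Unstop | Weekly Coding Challenge/Weekly Coding Challenge 1/ Shubham's Noble Warriors/Solution.py | count_valid_teams
-- ===== SOURCE A (Python) =====
-- from itertools import combinations
--
-- def count_valid_teams(N, K, strengths):
--     valid_team_count = 0
--
--     # Generate all possible subsets using combinations
--     # Check all subsets of all possible sizes (1 to N)
--     for r in range(1, N + 1):
--         for combo in combinations(strengths, r):
--             # Check if this subset is valid
--             is_valid = True
--             for i in range(r):
--                 for j in range(i + 1, r):
--                     if abs(combo[i] - combo[j]) == K:
--                         is_valid = False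
--                         break
--                 if not is_valid:
--                     break
--             if is_valid:
--                 valid_team_count += 1
--
--     return valid_team_count
-- ===== SOURCE B (Python) =====
-- def count_valid_teams(N, K, strengths):
--     # Incrementally build every valid subset once (pruning as we go), then count by size.
--     subsets = [[]]
--     for x in strengths:
--         subsets += [s + [x] for s in subsets if all(abs(x - y) != K for y in s)]
--     return sum(1 for s in subsets if 1 <= len(s) <= N)
-- ===== Notes on version B (the rewrite author's own statement) =====
-- stated objective: alternative
-- what changed: Replaced the per-size enumeration of all combinations with an O(r^2) pairwise check by a single left fold that incrementally extends only already-valid subsets (checking the new element against each kept subset in one pass) and then counts those of size 1..N.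
import Mathlib
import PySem

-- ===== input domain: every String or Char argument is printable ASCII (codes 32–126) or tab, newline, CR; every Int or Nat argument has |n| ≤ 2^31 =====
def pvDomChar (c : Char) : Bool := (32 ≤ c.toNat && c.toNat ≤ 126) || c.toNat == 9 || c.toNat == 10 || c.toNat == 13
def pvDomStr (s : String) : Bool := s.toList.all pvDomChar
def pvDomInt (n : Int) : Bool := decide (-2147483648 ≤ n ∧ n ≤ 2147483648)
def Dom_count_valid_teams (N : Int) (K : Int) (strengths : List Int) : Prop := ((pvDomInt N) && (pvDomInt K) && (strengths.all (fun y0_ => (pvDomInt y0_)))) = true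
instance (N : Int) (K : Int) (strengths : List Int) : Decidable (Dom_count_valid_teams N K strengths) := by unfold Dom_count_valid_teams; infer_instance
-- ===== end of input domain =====

-- B replaces A's per-size enumeration of combinations (each rechecked by a quadratic pairwise
-- scan) with one left fold that extends only already-valid subsets, then counts those of size 1..N.

-- ===== PORT A =====
-- the inner double loop with the is_valid flag and breaks (flag + break on a pure test = any)
def pvIsValidA (K : Int) (r : Int) (combo : List Int) : Bool :=
  !((PySem.List.pyRange 0 r 1).any (fun i =>
      (PySem.List.pyRange (i + 1) r 1).any (fun j =>
        (((PySem.List.pyGetD combo i 0) - (PySem.List.pyGetD combo j 0)).natAbs : Int) == K)))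

def count_valid_teams (N : Int) (K : Int) (strengths : List Int) : Int :=
  (PySem.List.pyRange 1 (N + 1) 1).foldl (fun acc r =>
    (PySem.List.combinations strengths r.toNat).foldl (fun acc2 combo =>
      if pvIsValidA K r combo then acc2 + 1 else acc2) acc) 0

-- ===== PORT B =====
def count_valid_teams_alt (N : Int) (K : Int) (strengths : List Int) : Int :=
  let subsets := strengths.foldl (fun acc x =>
    acc ++ (acc.filter (fun s => s.all (fun y => !(((x - y).natAbs : Int) == K)))).map
      (fun s => s ++ [x])) [[]]
  subsets.foldl (fun acc s => if 1 ≤ s.length ∧ (s.length : Int) ≤ N then acc + 1 else acc) 0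

-- ===== PRECONDITION & SPEC =====
def Spec_count_valid_teams (N : Int) (K : Int) (strengths : List Int) (out : Int) : Prop := out = count_valid_teams_alt N K strengths
instance (N : Int) (K : Int) (strengths : List Int) (out : Int) : Decidable (Spec_count_valid_teams N K strengths out) := by unfold Spec_count_valid_teams; infer_instance

-- ===== CLAIM (what is proved, stated in full; the proofs are below) =====
def Claim_equal_count_valid_teams : Prop := ∀ (N : Int) (K : Int) (strengths : List Int), Dom_count_valid_teams N K strengths → Spec_count_valid_teams N K strengths (count_valid_teams N K strengths)

-- ===== LEMMAS AND PROOFS =====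

-- a subset is valid iff no two of its members differ by K in absolute value
def pvOk (K : Int) (s : List Int) : Bool := decide (s.Pairwise (fun a b => ((a - b).natAbs : Int) ≠ K))

-- B's compatibility test (literally B's inner lambda)
def pvCompat (K : Int) (x : Int) (s : List Int) : Bool := s.all (fun y => !(((x - y).natAbs : Int) == K))

lemma pvIsValidA_eq_ok (K : Int) (c : List Int) :
    pvIsValidA K (c.length : Int) c = pvOk K c := by
  rw [Bool.eq_iff_iff, pvIsValidA, pvOk]
  simp only [Bool.not_eq_true', List.any_eq_false, List.any_eq_true, not_exists, not_and,
    PySem.List.mem_pyRange_one, beq_iff_eq, decide_eq_true_eq]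
  rw [List.pairwise_iff_getElem]
  constructor
  · intro h i j hi hj hij
    have h2 := h (i : Int) ⟨by omega, by omega⟩ (j : Int) ⟨by omega, by omega⟩
    rw [PySem.List.pyGetD_eq_getElem c 0 (by omega) (by omega),
        PySem.List.pyGetD_eq_getElem c 0 (by omega) (by omega)] at h2
    simpa using h2
  · intro h i hi j hj
    rw [PySem.List.pyGetD_eq_getElem c 0 (by omega) (by omega),
        PySem.List.pyGetD_eq_getElem c 0 (by omega) (by omega)]
    exact h i.toNat j.toNat (by omega) (by omega) (by omega)

lemma pvOk_append (K : Int) (s : List Int) (x : Int) :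
    pvOk K (s ++ [x]) = (pvOk K s && pvCompat K x s) := by
  rw [Bool.eq_iff_iff, pvOk, pvOk, pvCompat]
  simp only [Bool.and_eq_true, decide_eq_true_eq, List.all_eq_true, List.pairwise_append,
    List.pairwise_singleton, List.mem_singleton, Bool.not_eq_true', beq_eq_false_iff_ne]
  constructor
  · rintro ⟨h1, -, h2⟩
    refine ⟨h1, fun y hy => ?_⟩
    have := h2 y hy x rfl
    omega
  · rintro ⟨h1, h2⟩
    refine ⟨h1, trivial, fun a ha b hb => ?_⟩
    subst hb
    have := h2 a ha
    omega

lemma pvCombinations_perm (l : List Int) (k : Nat) :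
    List.Perm (PySem.List.combinations l k)
      ((l.sublists').filter (fun s => s.length == k)) := by
  induction l generalizing k with
  | nil =>
    cases k with
    | zero => simp [PySem.List.combinations_zero, List.sublists'_nil]
    | succ k => simp [PySem.List.combinations_nil_succ, List.sublists'_nil]
  | cons x xs ih =>
    rw [List.sublists'_cons, List.filter_append, List.filter_map]
    cases k with
    | zero =>
      have h2 : ((fun (s : List Int) => s.length == 0) ∘ (List.cons x)) = fun _ => false := by
        funext s; simp
      rw [PySem.List.combinations_zero, h2, List.filter_false, List.map_nil, List.append_nil]
      have h0 := ih 0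
      rw [PySem.List.combinations_zero] at h0
      exact h0
    | succ k =>
      have h2 : ((fun (s : List Int) => s.length == (k + 1)) ∘ (List.cons x))
          = fun (s : List Int) => s.length == k := by
        funext s
        rw [Bool.eq_iff_iff]
        simp only [Function.comp_apply, List.length_cons, beq_iff_eq]
        omega
      rw [PySem.List.combinations_cons_succ, h2]
      exact (((ih k).map _).append (ih (k + 1))).trans List.perm_append_comm

lemma pvSublists'_append (l : List Int) (x : Int) :
    List.Perm ((l ++ [x]).sublists')
      (l.sublists' ++ l.sublists'.map (fun s => s ++ [x])) := by
  induction l with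
  | nil => simp [List.sublists'_singleton]
  | cons y l ih =>
    rw [List.cons_append, List.sublists'_cons, List.sublists'_cons]
    refine ((ih.append (ih.map _)).trans ?_)
    rw [List.map_append, List.map_append, List.map_map, List.map_map]
    have hmm : ((List.cons y) ∘ (fun (s : List Int) => s ++ [x]))
        = ((fun (s : List Int) => s ++ [x]) ∘ (List.cons y)) := rfl
    rw [hmm]
    simp only [List.append_assoc]
    refine List.Perm.append_left _ ?_
    rw [← List.append_assoc, ← List.append_assoc]
    exact List.perm_append_comm.append_right _

lemma pvB_state_perm (K : Int) (l : List Int) :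
    List.Perm (l.foldl (fun acc x =>
      acc ++ (acc.filter (fun s => s.all (fun y => !(((x - y).natAbs : Int) == K)))).map
        (fun s => s ++ [x])) [[]])
      ((l.sublists').filter (pvOk K)) := by
  induction l using List.reverseRecOn with
  | nil => simp [List.sublists'_nil, pvOk]
  | append_singleton l x ih =>
    rw [List.foldl_append, List.foldl_cons, List.foldl_nil]
    refine List.Perm.trans ?_ (List.Perm.filter (pvOk K) (pvSublists'_append l x)).symm
    rw [List.filter_append, List.filter_map]
    have hpred : ((pvOk K) ∘ fun (s : List Int) => s ++ [x])
        = fun s => pvCompat K x s && pvOk K s := by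
      funext s
      simp [Function.comp, pvOk_append, Bool.and_comm]
    rw [hpred, ← List.filter_filter]
    exact ih.append ((List.Perm.filter _ ih).map _)

lemma pvCountRange (L n : Nat) :
    List.countP (fun k => L == k + 1) (List.range n) = if 1 ≤ L ∧ L ≤ n then 1 else 0 := by
  induction n with
  | zero =>
    have h : ¬(1 ≤ L ∧ L ≤ 0) := by omega
    simp only [List.range_zero, List.countP_nil]
    rw [if_neg h]
  | succ n ih =>
    rw [List.range_succ, List.countP_append, ih]
    simp only [List.countP_cons, List.countP_nil, Nat.zero_add, beq_iff_eq]
    split_ifs <;> omega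

lemma pvIndicator (N : Int) (L : Nat) :
    ((PySem.List.pyRange 1 (N + 1) 1).map (fun r => if (L == r.toNat) then (1 : Int) else 0)).sum
    = if (1 ≤ L ∧ (L : Int) ≤ N) then 1 else 0 := by
  rw [PySem.List.pyRange_one, List.map_map]
  have hf : ((fun (r : Int) => if (L == r.toNat) then (1 : Int) else 0) ∘ fun (k : Nat) => 1 + (k : Int))
      = fun (k : Nat) => if (L == k + 1) then (1 : Int) else 0 := by
    funext k
    have hk : ((1 : Int) + k).toNat = k + 1 := by omega
    simp [Function.comp, hk]
  rw [hf, PySem.List.sum_map_ite_one_zero, pvCountRange]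
  have hN : (N + 1 - 1).toNat = N.toNat := by omega
  rw [hN]
  by_cases h : 1 ≤ L ∧ (L : Int) ≤ N
  · have h2 : 1 ≤ L ∧ L ≤ N.toNat := by omega
    simp [h, h2]
  · have h2 : ¬(1 ≤ L ∧ L ≤ N.toNat) := by omega
    simp [h, h2]

lemma pvSum_count (N : Int) (M : List (List Int)) :
    ((PySem.List.pyRange 1 (N + 1) 1).map (fun r =>
      (M.countP (fun s => s.length == r.toNat) : Int))).sum
    = (M.countP (fun s => decide (1 ≤ s.length ∧ (s.length : Int) ≤ N)) : Int) := by
  induction M with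
  | nil => simp
  | cons s M ih =>
    simp only [List.countP_cons]
    have hsplit : (fun (r : Int) =>
          ((M.countP (fun s' => s'.length == r.toNat) + if (s.length == r.toNat) then 1 else 0 : Nat) : Int))
        = fun (r : Int) => ((M.countP (fun s' => s'.length == r.toNat) : Nat) : Int)
            + (if (s.length == r.toNat) then (1 : Int) else 0) := by
      funext r; split_ifs <;> simp
    rw [hsplit, PySem.List.sum_map_add_int, ih, pvIndicator]
    by_cases h : 1 ≤ s.length ∧ (s.length : Int) ≤ N
    · simp [h]
    · simp [h]

-- ===== VERDICT (by name: the statement is the Claim_ definition above) =====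
theorem count_valid_teams_spec : Claim_equal_count_valid_teams := by
  intro N K strengths _
  show count_valid_teams N K strengths = count_valid_teams_alt N K strengths
  simp only [count_valid_teams, count_valid_teams_alt]
  have hcong : ∀ (acc : Int), ∀ r ∈ PySem.List.pyRange 1 (N + 1) 1,
      (PySem.List.combinations strengths r.toNat).foldl
        (fun acc2 combo => if pvIsValidA K r combo then acc2 + 1 else acc2) acc
      = acc + ((strengths.sublists'.filter (pvOk K)).countP (fun s => s.length == r.toNat) : Int) := by
    intro acc r hr
    rw [PySem.List.foldl_if_add_one]
    congr 2
    have hr1 : 1 ≤ r := ((PySem.List.mem_pyRange_one).mp hr).1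
    calc List.countP (pvIsValidA K r) (PySem.List.combinations strengths r.toNat)
        = List.countP (pvOk K) (PySem.List.combinations strengths r.toNat) := by
          refine List.countP_congr (fun c hc => ?_)
          have hlen := PySem.List.length_of_mem_combinations hc
          have hcast : (c.length : Int) = r := by rw [hlen]; omega
          rw [← hcast, pvIsValidA_eq_ok]
      _ = List.countP (pvOk K)
            ((strengths.sublists').filter (fun s => s.length == r.toNat)) :=
          List.Perm.countP_eq _ (pvCombinations_perm strengths r.toNat)
      _ = List.countP (fun s => pvOk K s && (s.length == r.toNat)) strengths.sublists' :=
          List.countP_filter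
      _ = List.countP (fun s => (s.length == r.toNat) && pvOk K s) strengths.sublists' := by
          refine List.countP_congr (fun c _ => ?_)
          simp [Bool.and_comm]
      _ = List.countP (fun s => s.length == r.toNat) (strengths.sublists'.filter (pvOk K)) :=
          List.countP_filter.symm
  rw [PySem.List.foldl_congr_mem _ _ _ 0 hcong]
  rw [PySem.List.foldl_add, zero_add, pvSum_count]
  rw [PySem.List.foldl_ite_add_one, zero_add]
  rw [List.Perm.countP_eq _ (pvB_state_perm K strengths)]
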